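-- pv_equiv track=rewrite | github.com/chandrahasM/AG2-SDLC | agents/repository_analyzer/advanced_ast_parser.py | _classify_return_category
-- ===== SOURCE A (Python) =====
-- def _classify_return_category(return_type: str) -> str:
--     """Classify return type category"""
--     type_lower = return_type.lower()
--
--     if 'user' in type_lower:
--         return 'user_data'
--     elif any(word in type_lower for word in ['hotel', 'room', 'booking']):
--         return 'business_entity'
--     elif 'response' in type_lower:
--         return 'api_response'
--     elif any(word in type_lower for word in ['list', 'dict', 'optional']):
--         return 'collection_data'
--     else:
--         return 'simple_data'
-- ===== SOURCE B (Python) =====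
-- _PRIORITY = {
--     'user': 0,
--     'hotel': 1, 'room': 1, 'booking': 1,
--     'response': 2,
--     'list': 3, 'dict': 3, 'optional': 3,
-- }
-- _CATEGORIES = ['user_data', 'business_entity', 'api_response',
--                'collection_data', 'simple_data']
--
--
-- def _classify_return_category(return_type: str) -> str:
--     """Classify return type category.
--
--     Naive multi-pattern scan: walk the lowercased string position by
--     position, and keep the lowest priority of any keyword that starts
--     at the current position.  The first-matching-branch rule of the
--     original if/elif chain is exactly 'minimum priority over all
--     keywords occurring anywhere in the string'.
--     """
--     t = return_type.lower()
--     best = 4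
--     for i in range(len(t)):
--         for kw, p in _PRIORITY.items():
--             if p < best and t.startswith(kw, i):
--                 best = p
--     return _CATEGORIES[best]
-- ===== Notes on version B (the rewrite author's own statement) =====
-- stated objective: alternative
-- what changed: Replaces the chain of independent substring searches by a single left-to-right scan of the string that, at each position, checks which keywords start there and keeps the minimum keyword priority; the answer is the category of that minimum.
import Mathlib
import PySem

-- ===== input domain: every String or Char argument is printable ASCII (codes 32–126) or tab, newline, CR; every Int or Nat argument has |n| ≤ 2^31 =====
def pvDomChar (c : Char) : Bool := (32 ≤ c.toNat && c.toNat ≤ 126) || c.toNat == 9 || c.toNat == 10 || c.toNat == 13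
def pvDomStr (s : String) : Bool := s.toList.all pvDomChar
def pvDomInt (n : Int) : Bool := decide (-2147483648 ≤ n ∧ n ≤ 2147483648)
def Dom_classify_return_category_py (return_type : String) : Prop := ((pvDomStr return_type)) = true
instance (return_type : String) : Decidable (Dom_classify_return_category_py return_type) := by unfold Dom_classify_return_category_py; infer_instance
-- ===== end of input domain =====

-- B replaces A's chain of independent substring searches by one left-to-right scan of the
-- string keeping the minimum priority of any keyword starting at each position (alternative).

-- ===== PORT A =====
def classify_return_category_py (return_type : String) : String :=
  let type_lower := PySem.Str.lower return_type
  if PySem.Str.isIn "user" type_lower then "user_data"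
  else if ["hotel", "room", "booking"].any (fun word => PySem.Str.isIn word type_lower) then "business_entity"
  else if PySem.Str.isIn "response" type_lower then "api_response"
  else if ["list", "dict", "optional"].any (fun word => PySem.Str.isIn word type_lower) then "collection_data"
  else "simple_data"

-- ===== PORT B =====
-- the _PRIORITY dict of Source B (insertion order) and the _CATEGORIES list
def pvPriority : List (List Char × Nat) :=
  [("user".toList, 0),
   ("hotel".toList, 1), ("room".toList, 1), ("booking".toList, 1),
   ("response".toList, 2),
   ("list".toList, 3), ("dict".toList, 3), ("optional".toList, 3)]

def pvCategories : List String :=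
  ["user_data", "business_entity", "api_response", "collection_data", "simple_data"]

-- t.startswith(kw, i) for 0 ≤ i: kw is a prefix of the character list dropped at i (exact there)
def classify_return_category_py_alt (return_type : String) : String :=
  let t := (PySem.Str.lower return_type).toList
  let best := (List.range t.length).foldl
    (fun b i => pvPriority.foldl
      (fun b p => if p.2 < b && p.1.isPrefixOf (t.drop i) then p.2 else b) b) 4
  pvCategories.getD best "simple_data"

-- ===== PRECONDITION & SPEC =====
def Spec_classify_return_category_py (return_type : String) (out : String) : Prop := out = classify_return_category_py_alt return_type
instance (return_type : String) (out : String) : Decidable (Spec_classify_return_category_py return_type out) := by unfold Spec_classify_return_category_py; infer_instance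

-- ===== CLAIM (what is proved, stated in full; the proofs are below) =====
def Claim_equal_classify_return_category_py : Prop := ∀ (return_type : String), Dom_classify_return_category_py return_type → Spec_classify_return_category_py return_type (classify_return_category_py return_type)

-- ===== LEMMAS AND PROOFS =====

-- the guarded update 'if p < b and cond then p else b' is 'if cond then min b p else b'
theorem pv_step_eq (t : List Char) (i : Nat) (b : Nat) :
    pvPriority.foldl (fun b p => if p.2 < b && p.1.isPrefixOf (t.drop i) then p.2 else b) b
    = pvPriority.foldl (fun b p => if p.1.isPrefixOf (t.drop i) then min b p.2 else b) b := by
  have h : (fun (b : Nat) (p : List Char × Nat) => if p.2 < b && p.1.isPrefixOf (t.drop i) then p.2 else b)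
      = (fun (b : Nat) (p : List Char × Nat) => if p.1.isPrefixOf (t.drop i) then min b p.2 else b) := by
    funext b p
    by_cases hc : p.1.isPrefixOf (t.drop i) = true <;> by_cases hl : p.2 < b <;>
      simp [hc, hl, Nat.min_def]

  rw [h]

-- fold of conditional min = fold of min over the filtered-and-mapped list
theorem pv_fold_min_filter {α : Type} (c : α → Bool) (g : α → Nat) (L : List α) (b : Nat) :
    L.foldl (fun b a => if c a then min b (g a) else b) b
    = ((L.filter c).map g).foldl min b := by
  induction L generalizing b with
  | nil => rfl
  | cons a L ih =>
    by_cases h : c a = true <;> simp [h, List.foldl_cons, ih]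

-- folding per-position min-folds = one min-fold over the flattened list
theorem pv_fold_flat (S : List Nat) (M : Nat → List Nat) (b : Nat) :
    S.foldl (fun b i => (M i).foldl min b) b = (S.flatMap M).foldl min b := by
  induction S generalizing b with
  | nil => rfl
  | cons a S ih => simp [List.flatMap_cons, List.foldl_append, ih]

theorem pv_foldl_min_le_init (P : List Nat) (b : Nat) : P.foldl min b ≤ b := by
  induction P generalizing b with
  | nil => exact Nat.le_refl b
  | cons p P ih => exact Nat.le_trans (ih (min b p)) (Nat.min_le_left b p)

theorem pv_foldl_min_le_mem (P : List Nat) (b : Nat) : ∀ p ∈ P, P.foldl min b ≤ p := by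
  induction P generalizing b with
  | nil => intro p hp; cases hp
  | cons q P ih =>
    intro p hp
    rcases List.mem_cons.mp hp with h | h
    · subst h; exact Nat.le_trans (pv_foldl_min_le_init P (min b p)) (Nat.min_le_right b p)
    · exact ih (min b q) p h

theorem pv_foldl_min_mem_or (P : List Nat) (b : Nat) : P.foldl min b = b ∨ P.foldl min b ∈ P := by
  induction P generalizing b with
  | nil => exact Or.inl rfl
  | cons q P ih =>
    rcases ih (min b q) with h | h
    · by_cases hbq : min b q = b
      · rw [hbq] at h
        exact Or.inl (by rw [List.foldl_cons, hbq]; exact h)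
      · have hq : min b q = q := by omega
        rw [hq] at h
        exact Or.inr (by rw [List.foldl_cons, hq, h]; exact List.mem_cons_self ..)
    · exact Or.inr (List.mem_cons_of_mem q (by rw [List.foldl_cons]; exact h))

-- bounded-position prefix matching is substring membership, for nonempty keywords
theorem pv_match_iff (kw t : List Char) (hk : kw ≠ []) :
    (∃ i ∈ List.range t.length, kw.isPrefixOf (t.drop i) = true)
    ↔ PySem.Chars.isIn kw t = true := by
  rw [← PySem.Chars.exists_prefix_drop_iff_isIn]
  constructor
  · rintro ⟨i, _, h⟩
    exact ⟨i, List.isPrefixOf_iff_prefix.mp h⟩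
  · rintro ⟨j, h⟩
    by_cases hj : j < t.length
    · exact ⟨j, List.mem_range.mpr hj, List.isPrefixOf_iff_prefix.mpr h⟩
    · exfalso
      have : t.drop j = [] := List.drop_eq_nil_of_le (Nat.le_of_not_lt hj)
      rw [this] at h
      exact hk (List.prefix_nil.mp h)

-- the flattened priority list of B's double loop
def pvP (t : List Char) : List Nat :=
  (List.range t.length).flatMap
    (fun i => ((pvPriority.filter (fun p => p.1.isPrefixOf (t.drop i))).map (·.2)))

theorem pv_best_eq (t : List Char) :
    (List.range t.length).foldl
      (fun b i => pvPriority.foldl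
        (fun b p => if p.2 < b && p.1.isPrefixOf (t.drop i) then p.2 else b) b) 4
    = (pvP t).foldl min 4 := by
  have h1 : (fun (b : Nat) (i : Nat) => pvPriority.foldl
        (fun b p => if p.2 < b && p.1.isPrefixOf (t.drop i) then p.2 else b) b)
      = (fun (b : Nat) (i : Nat) =>
          ((pvPriority.filter (fun p => p.1.isPrefixOf (t.drop i))).map (·.2)).foldl min b) := by
    funext b i
    rw [pv_step_eq, pv_fold_min_filter]
  rw [h1, pv_fold_flat, pvP]

-- membership in pvP in terms of the four isIn groups
theorem pv_mem_P_iff (t : List Char) (k : Nat) :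
    k ∈ pvP t ↔
      ((k = 0 ∧ PySem.Chars.isIn "user".toList t = true)
     ∨ (k = 1 ∧ (PySem.Chars.isIn "hotel".toList t = true ∨ PySem.Chars.isIn "room".toList t = true ∨ PySem.Chars.isIn "booking".toList t = true))
     ∨ (k = 2 ∧ PySem.Chars.isIn "response".toList t = true)
     ∨ (k = 3 ∧ (PySem.Chars.isIn "list".toList t = true ∨ PySem.Chars.isIn "dict".toList t = true ∨ PySem.Chars.isIn "optional".toList t = true))) := by
  have huser := pv_match_iff "user".toList t (by decide)
  have hhotel := pv_match_iff "hotel".toList t (by decide)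
  have hroom := pv_match_iff "room".toList t (by decide)
  have hbooking := pv_match_iff "booking".toList t (by decide)
  have hresponse := pv_match_iff "response".toList t (by decide)
  have hlist := pv_match_iff "list".toList t (by decide)
  have hdict := pv_match_iff "dict".toList t (by decide)
  have hoptional := pv_match_iff "optional".toList t (by decide)
  simp only [pvP, List.mem_flatMap, List.mem_map, List.mem_filter, pvPriority]
  constructor
  · rintro ⟨i, hi, p, ⟨hp, hpre⟩, hk⟩
    fin_cases hp <;> subst hk <;> simp_all <;>
      first
        | (exact huser.mp ⟨i, hi, hpre⟩)
        | (exact Or.inl (hhotel.mp ⟨i, hi, hpre⟩))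
        | (exact Or.inr (Or.inl (hroom.mp ⟨i, hi, hpre⟩)))
        | (exact Or.inr (Or.inr (hbooking.mp ⟨i, hi, hpre⟩)))
        | (exact hresponse.mp ⟨i, hi, hpre⟩)
        | (exact Or.inl (hlist.mp ⟨i, hi, hpre⟩))
        | (exact Or.inr (Or.inl (hdict.mp ⟨i, hi, hpre⟩)))
        | (exact Or.inr (Or.inr (hoptional.mp ⟨i, hi, hpre⟩)))
  · rintro (⟨hk, h⟩ | ⟨hk, h | h | h⟩ | ⟨hk, h⟩ | ⟨hk, h | h | h⟩) <;> subst hk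
    · obtain ⟨i, hi, hpre⟩ := huser.mpr h
      exact ⟨i, hi, ("user".toList, 0), ⟨by simp, hpre⟩, rfl⟩
    · obtain ⟨i, hi, hpre⟩ := hhotel.mpr h
      exact ⟨i, hi, ("hotel".toList, 1), ⟨by simp, hpre⟩, rfl⟩
    · obtain ⟨i, hi, hpre⟩ := hroom.mpr h
      exact ⟨i, hi, ("room".toList, 1), ⟨by simp, hpre⟩, rfl⟩
    · obtain ⟨i, hi, hpre⟩ := hbooking.mpr h
      exact ⟨i, hi, ("booking".toList, 1), ⟨by simp, hpre⟩, rfl⟩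
    · obtain ⟨i, hi, hpre⟩ := hresponse.mpr h
      exact ⟨i, hi, ("response".toList, 2), ⟨by simp, hpre⟩, rfl⟩
    · obtain ⟨i, hi, hpre⟩ := hlist.mpr h
      exact ⟨i, hi, ("list".toList, 3), ⟨by simp, hpre⟩, rfl⟩
    · obtain ⟨i, hi, hpre⟩ := hdict.mpr h
      exact ⟨i, hi, ("dict".toList, 3), ⟨by simp, hpre⟩, rfl⟩
    · obtain ⟨i, hi, hpre⟩ := hoptional.mpr h
      exact ⟨i, hi, ("optional".toList, 3), ⟨by simp, hpre⟩, rfl⟩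

-- ===== VERDICT (by name: the statement is the Claim_ definition above) =====
theorem classify_return_category_py_spec : Claim_equal_classify_return_category_py := by
  intro rt _
  unfold Spec_classify_return_category_py classify_return_category_py classify_return_category_py_alt
  simp only [List.any_cons, List.any_nil, Bool.or_false, PySem.Str.isIn_eq, PySem.Str.toList_lower]
  set t := PySem.Chars.lower rt.toList with ht
  rw [pv_best_eq t]
  have hmem := pv_mem_P_iff t
  have hle_mem := pv_foldl_min_le_mem (pvP t) 4
  have hor := pv_foldl_min_mem_or (pvP t) 4
  set m := (pvP t).foldl min 4 with hm
  -- each keyword group that matches forces an upper bound on m; a false group excludes its index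
  have hmval : m = 0 ∨ m = 1 ∨ m = 2 ∨ m = 3 ∨ m = 4 := by
    rcases hor with h | h
    · omega
    · rcases (hmem m).mp h with ⟨h', _⟩ | ⟨h', _⟩ | ⟨h', _⟩ | ⟨h', _⟩ <;> omega
  have huserF : 0 < m → PySem.Chars.isIn ['u','s','e','r'] t = false := by
    intro hlt
    cases hc : PySem.Chars.isIn ['u','s','e','r'] t
    · rfl
    · exact absurd (hle_mem 0 ((hmem 0).mpr (Or.inl ⟨rfl, hc⟩))) (by omega)
  have hhotelF : 1 < m → PySem.Chars.isIn ['h','o','t','e','l'] t = false := by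
    intro hlt
    cases hc : PySem.Chars.isIn ['h','o','t','e','l'] t
    · rfl
    · exact absurd (hle_mem 1 ((hmem 1).mpr (Or.inr (Or.inl ⟨rfl, Or.inl hc⟩)))) (by omega)
  have hroomF : 1 < m → PySem.Chars.isIn ['r','o','o','m'] t = false := by
    intro hlt
    cases hc : PySem.Chars.isIn ['r','o','o','m'] t
    · rfl
    · exact absurd (hle_mem 1 ((hmem 1).mpr (Or.inr (Or.inl ⟨rfl, Or.inr (Or.inl hc)⟩)))) (by omega)
  have hbookingF : 1 < m → PySem.Chars.isIn ['b','o','o','k','i','n','g'] t = false := by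
    intro hlt
    cases hc : PySem.Chars.isIn ['b','o','o','k','i','n','g'] t
    · rfl
    · exact absurd (hle_mem 1 ((hmem 1).mpr (Or.inr (Or.inl ⟨rfl, Or.inr (Or.inr hc)⟩)))) (by omega)
  have hrespF : 2 < m → PySem.Chars.isIn ['r','e','s','p','o','n','s','e'] t = false := by
    intro hlt
    cases hc : PySem.Chars.isIn ['r','e','s','p','o','n','s','e'] t
    · rfl
    · exact absurd (hle_mem 2 ((hmem 2).mpr (Or.inr (Or.inr (Or.inl ⟨rfl, hc⟩))))) (by omega)
  have hlistF : 3 < m → PySem.Chars.isIn ['l','i','s','t'] t = false := by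
    intro hlt
    cases hc : PySem.Chars.isIn ['l','i','s','t'] t
    · rfl
    · exact absurd (hle_mem 3 ((hmem 3).mpr (Or.inr (Or.inr (Or.inr ⟨rfl, Or.inl hc⟩))))) (by omega)
  have hdictF : 3 < m → PySem.Chars.isIn ['d','i','c','t'] t = false := by
    intro hlt
    cases hc : PySem.Chars.isIn ['d','i','c','t'] t
    · rfl
    · exact absurd (hle_mem 3 ((hmem 3).mpr (Or.inr (Or.inr (Or.inr ⟨rfl, Or.inr (Or.inl hc)⟩))))) (by omega)
  have hoptF : 3 < m → PySem.Chars.isIn ['o','p','t','i','o','n','a','l'] t = false := by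
    intro hlt
    cases hc : PySem.Chars.isIn ['o','p','t','i','o','n','a','l'] t
    · rfl
    · exact absurd (hle_mem 3 ((hmem 3).mpr (Or.inr (Or.inr (Or.inr ⟨rfl, Or.inr (Or.inr hc)⟩))))) (by omega)
  rcases hmval with hv | hv | hv | hv | hv
  · -- m = 0: 'user' matched
    have hin : (0 : Nat) ∈ pvP t := by
      have h := hor.resolve_left (by omega); rwa [hv] at h
    rcases (hmem 0).mp hin with ⟨_, hu⟩ | ⟨h', _⟩ | ⟨h', _⟩ | ⟨h', _⟩ <;> try omega
    have hu' : PySem.Chars.isIn ['u','s','e','r'] t = true := hu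
    simp [hv, hu', pvCategories]
  · -- m = 1: no 'user'; one of hotel/room/booking matched
    have hin : (1 : Nat) ∈ pvP t := by
      have h := hor.resolve_left (by omega); rwa [hv] at h
    rcases (hmem 1).mp hin with ⟨h', _⟩ | ⟨_, hg⟩ | ⟨h', _⟩ | ⟨h', _⟩ <;> try omega
    have hu := huserF (by omega)
    rcases hg with hg | hg | hg
    · have hg' : PySem.Chars.isIn ['h','o','t','e','l'] t = true := hg
      simp [hv, hu, hg', pvCategories]
    · have hg' : PySem.Chars.isIn ['r','o','o','m'] t = true := hg
      simp [hv, hu, hg', pvCategories]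
    · have hg' : PySem.Chars.isIn ['b','o','o','k','i','n','g'] t = true := hg
      simp [hv, hu, hg', pvCategories]
  · -- m = 2: 'response' matched, nothing better
    have hin : (2 : Nat) ∈ pvP t := by
      have h := hor.resolve_left (by omega); rwa [hv] at h
    rcases (hmem 2).mp hin with ⟨h', _⟩ | ⟨h', _⟩ | ⟨_, hr⟩ | ⟨h', _⟩ <;> try omega
    have hr' : PySem.Chars.isIn ['r','e','s','p','o','n','s','e'] t = true := hr
    simp [hv, huserF (by omega), hhotelF (by omega), hroomF (by omega), hbookingF (by omega), hr', pvCategories]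
  · -- m = 3: one of list/dict/optional matched, nothing better
    have hin : (3 : Nat) ∈ pvP t := by
      have h := hor.resolve_left (by omega); rwa [hv] at h
    rcases (hmem 3).mp hin with ⟨h', _⟩ | ⟨h', _⟩ | ⟨h', _⟩ | ⟨_, hg⟩ <;> try omega
    rcases hg with hg | hg | hg
    · have hg' : PySem.Chars.isIn ['l','i','s','t'] t = true := hg
      simp [hv, huserF (by omega), hhotelF (by omega), hroomF (by omega), hbookingF (by omega),
        hrespF (by omega), hg', pvCategories]
    · have hg' : PySem.Chars.isIn ['d','i','c','t'] t = true := hg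
      simp [hv, huserF (by omega), hhotelF (by omega), hroomF (by omega), hbookingF (by omega),
        hrespF (by omega), hg', pvCategories]
    · have hg' : PySem.Chars.isIn ['o','p','t','i','o','n','a','l'] t = true := hg
      simp [hv, huserF (by omega), hhotelF (by omega), hroomF (by omega), hbookingF (by omega),
        hrespF (by omega), hg', pvCategories]
  · -- m = 4: nothing matched
    simp [hv, huserF (by omega), hhotelF (by omega), hroomF (by omega), hbookingF (by omega),
      hrespF (by omega), hlistF (by omega), hdictF (by omega), hoptF (by omega), pvCategories]
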